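-- pv_equiv track=rewrite | github.com/mandiant/capa | mapa/renderer.py | _visible_tags
-- ===== SOURCE A (Python) =====
-- def _visible_tags(tags: tuple[str, ...]) -> list[str]:
--     tag_set = set(tags)
--     has_specific = any(t != "#common" for t in tag_set)
--     result = []
--     for t in tags:
--         if t == "#common" and has_specific:
--             continue
--         result.append(t)
--     return result
-- ===== SOURCE B (Python) =====
-- def _visible_tags(tags: tuple[str, ...]) -> list[str]:
--     specific = [t for t in tags if t != "#common"]
--     return specific if specific else list(tags)
-- ===== Notes on version B (the rewrite author's own statement) =====
-- stated objective: simpler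
-- what changed: Single filtering pass: B derives 'has specific tags' from the filtered list being nonempty, dropping A's intermediate set, the any() scan and the conditional-continue loop.
import Mathlib
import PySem

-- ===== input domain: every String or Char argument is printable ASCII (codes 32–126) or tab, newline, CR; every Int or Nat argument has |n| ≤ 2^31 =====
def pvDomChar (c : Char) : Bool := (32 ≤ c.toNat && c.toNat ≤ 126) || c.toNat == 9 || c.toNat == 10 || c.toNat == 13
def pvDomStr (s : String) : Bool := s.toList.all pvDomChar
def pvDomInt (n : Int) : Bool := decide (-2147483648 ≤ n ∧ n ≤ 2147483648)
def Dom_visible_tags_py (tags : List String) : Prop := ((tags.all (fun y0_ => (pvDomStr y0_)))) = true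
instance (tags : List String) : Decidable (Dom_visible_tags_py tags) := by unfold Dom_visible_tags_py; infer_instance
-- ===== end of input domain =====

-- B replaces A's set + any() scan + conditional-continue loop with one filter pass, deriving 'has specific tags' from the filtered list's emptiness (simpler; same return value).
-- ===== PORT A =====
def visible_tags_py (tags : List String) : List String :=
  let tag_set : PySem.Set String := PySem.Set.ofList tags
  let has_specific : Bool := tag_set.any (fun t => t != "#common")
  tags.foldl (fun result t =>
    if t == "#common" && has_specific then result else result ++ [t]) []

-- ===== PORT B =====
def visible_tags_py_alt (tags : List String) : List String :=
  let specific := tags.filter (fun t => t != "#common")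
  if specific.isEmpty then tags else specific

-- ===== PRECONDITION & SPEC =====
def Spec_visible_tags_py (tags : List String) (out : List String) : Prop := out = visible_tags_py_alt tags
instance (tags : List String) (out : List String) : Decidable (Spec_visible_tags_py tags out) := by unfold Spec_visible_tags_py; infer_instance

-- ===== CLAIM (what is proved, stated in full; the proofs are below) =====
def Claim_equal_visible_tags_py : Prop := ∀ (tags : List String), Dom_visible_tags_py tags → Spec_visible_tags_py tags (visible_tags_py tags)

-- ===== LEMMAS AND PROOFS =====

-- ===== VERDICT (by name: the statement is the Claim_ definition above) =====
-- the set's 'any' agrees with 'any' over the original list (membership is the same)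
theorem any_ofList_eq (tags : List String) :
    (PySem.Set.ofList tags).any (fun t => t != "#common") = tags.any (fun t => t != "#common") := by
  rw [Bool.eq_iff_iff]
  simp only [List.any_eq_true, PySem.Set.mem_ofList]

theorem visible_tags_py_spec : Claim_equal_visible_tags_py := by
  intro tags _
  unfold Spec_visible_tags_py visible_tags_py visible_tags_py_alt
  simp only []
  rw [any_ofList_eq]
  rcases Bool.eq_false_or_eq_true (tags.any (fun t => t != "#common")) with h | h <;> rw [h]
  · -- a specific tag exists: fold = filter, which is nonempty
    simp only [Bool.and_true]
    rw [show (fun (result : List String) t => if (t == "#common") = true then result else result ++ [t])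
        = (fun result t => if (t != "#common") = true then result ++ [t] else result) by
      funext r t; by_cases ht : t = "#common" <;> simp [ht]]
    rw [PySem.List.foldl_append_if_eq_filter]
    rw [List.any_eq_true] at h
    obtain ⟨t, ht, hne⟩ := h
    have hm : t ∈ tags.filter (fun t => t != "#common") := List.mem_filter.2 ⟨ht, hne⟩
    rcases hfe : tags.filter (fun t => t != "#common") with _ | _
    · rw [hfe] at hm; simp at hm
    · simp
  · -- no specific tag: the fold keeps everything and the filter is empty
    simp only [Bool.and_false, Bool.false_eq_true, if_false]
    rw [PySem.List.foldl_append_eq_flatMap (g := fun t => [t])]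
    rw [List.any_eq_false] at h
    have hf : tags.filter (fun t => t != "#common") = [] := by
      rw [List.filter_eq_nil_iff]; intro t ht; simpa using h t ht
    simp [hf]
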